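-- pv_equiv track=rewrite | github.com/shivammehta25/Fun-Coding | CodeSignal/Interview-Practice/DynamicProgramming_easy/compose_ranges.py | composeRanges
-- ===== SOURCE A (Python) =====
-- def composeRanges(nums):
--     ans = []
--     n = len(nums)
--     if n <= 1:
--         return [str(i) for i in nums]
--     start = 0
--     for i in range(n - 1):
--         if nums[i] + 1 != nums[i + 1]:
--             if start == i:
--                 ans.append(str(nums[start]))
--             else:
--                 ans.append(str(nums[start])+ '->' + str(nums[i]) )
--
--             start = i + 1
--
--     if start == n - 1:
--         ans.append(str(nums[start]))
--     else:
--         ans.append(str(nums[start]) + '->' + str(nums[n - 1]))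
--
--     return ans
-- ===== SOURCE B (Python) =====
-- def composeRanges(nums):
--     if not nums:
--         return []
--     n = len(nums)
--     # stage 1: all cut positions — a cut before index 0, after index n-1,
--     # and between every adjacent pair that is not consecutive
--     cuts = [0] + [i + 1 for i in range(n - 1) if nums[i] + 1 != nums[i + 1]] + [n]
--     # stage 2: each adjacent pair of cuts (s, e) delimits one run nums[s:e]
--     out = []
--     for s, e in zip(cuts, cuts[1:]):
--         if e - s == 1:
--             out.append(str(nums[s]))
--         else:
--             out.append(str(nums[s]) + '->' + str(nums[e - 1]))
--     return out
-- ===== Notes on version B (the rewrite author's own statement) =====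
-- stated objective: alternative
-- what changed: Instead of A's single stateful scan that carries a start index and flushes a run at each break and after the loop, B first computes the list of all cut positions (a filtered index comprehension) and then formats the runs by zipping adjacent cuts; no run state is carried during the scan and there is no duplicated tail-flush code.
import Mathlib
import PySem

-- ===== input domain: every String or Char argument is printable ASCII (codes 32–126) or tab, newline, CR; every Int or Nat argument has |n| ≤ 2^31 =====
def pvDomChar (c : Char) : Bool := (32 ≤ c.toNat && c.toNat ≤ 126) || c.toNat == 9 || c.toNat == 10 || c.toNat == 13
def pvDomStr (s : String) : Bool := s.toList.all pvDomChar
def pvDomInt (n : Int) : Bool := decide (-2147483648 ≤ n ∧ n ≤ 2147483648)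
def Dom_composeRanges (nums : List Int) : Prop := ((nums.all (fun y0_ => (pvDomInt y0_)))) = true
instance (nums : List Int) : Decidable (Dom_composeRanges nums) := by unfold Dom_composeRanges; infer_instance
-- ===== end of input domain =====

-- B replaces A's stateful scan (start index + tail flush) by two stages: first compute
-- the list of cut positions, then format runs by zipping adjacent cuts; objective: alternative.

-- str(a) + '->' + str(b)  (shared string helper, exact on List Char)
def pvArrow (a b : Int) : String :=
  String.ofList (PySem.Int.toChars a ++ '-' :: '>' :: PySem.Int.toChars b)

-- ===== PORT A =====
-- one iteration of A's 'for i in range(n - 1)' loop; state = (ans, start)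
def aStep (nums : List Int) (st : List String × Int) (i : Int) : List String × Int :=
  if PySem.List.pyGetD nums i 0 + 1 ≠ PySem.List.pyGetD nums (i + 1) 0 then
    (st.1 ++ [if st.2 = i then PySem.Int.toStr (PySem.List.pyGetD nums st.2 0)
              else pvArrow (PySem.List.pyGetD nums st.2 0) (PySem.List.pyGetD nums i 0)],
     i + 1)
  else st

-- A's code after the loop: flush the final run
def aFin (nums : List Int) (st : List String × Int) : List String :=
  if st.2 = (nums.length : Int) - 1 then
    st.1 ++ [PySem.Int.toStr (PySem.List.pyGetD nums st.2 0)]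
  else
    st.1 ++ [pvArrow (PySem.List.pyGetD nums st.2 0)
                     (PySem.List.pyGetD nums ((nums.length : Int) - 1) 0)]

def composeRanges (nums : List Int) : List String :=
  if (nums.length : Int) ≤ 1 then nums.map PySem.Int.toStr
  else aFin nums ((PySem.List.pyRange 0 ((nums.length : Int) - 1) 1).foldl (aStep nums) ([], 0))

-- ===== PORT B =====
-- the break test of B's comprehension filter
def bTest (nums : List Int) (i : Int) : Bool :=
  PySem.List.pyGetD nums i 0 + 1 != PySem.List.pyGetD nums (i + 1) 0

-- body of B's 'for s, e in zip(cuts, cuts[1:])' loop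
def bFmtPair (nums : List Int) (se : Int × Int) : String :=
  if se.2 - se.1 = 1 then PySem.Int.toStr (PySem.List.pyGetD nums se.1 0)
  else pvArrow (PySem.List.pyGetD nums se.1 0) (PySem.List.pyGetD nums (se.2 - 1) 0)

def composeRanges_alt (nums : List Int) : List String :=
  if nums = [] then []
  else
    let n : Int := nums.length
    let cuts : List Int :=
      0 :: ((PySem.List.pyRange 0 (n - 1) 1).filter (bTest nums)).map (· + 1) ++ [n]
    (List.zip cuts cuts.tail).map (bFmtPair nums)

-- ===== PRECONDITION & SPEC =====
def Spec_composeRanges (nums : List Int) (out : List String) : Prop := out = composeRanges_alt nums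
instance (nums : List Int) (out : List String) : Decidable (Spec_composeRanges nums out) := by unfold Spec_composeRanges; infer_instance

-- ===== CLAIM (what is proved, stated in full; the proofs are below) =====
def Claim_equal_composeRanges : Prop := ∀ (nums : List Int), Dom_composeRanges nums → Spec_composeRanges nums (composeRanges nums)

-- ===== LEMMAS AND PROOFS =====

-- canonical recursion both programs are reduced to: current run goes from value s to value x
def fmt2 (s x : Int) : String := if s = x then PySem.Int.toStr s else pvArrow s x

def crRec (s x : Int) : List Int → List String
  | [] => [fmt2 s x]
  | y :: ys => if x + 1 ≠ y then fmt2 s x :: crRec y y ys else crRec s y ys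

-- shared run lemmas ---------------------------------------------------------

lemma run_val (nums : List Int) (start k : Nat) (hs : start ≤ k)
    (hrun : ∀ j, start ≤ j → j < k → nums.getD j 0 + 1 = nums.getD (j + 1) 0) :
    nums.getD k 0 = nums.getD start 0 + ((k : Int) - (start : Int)) := by
  induction k with
  | zero => interval_cases start; simp
  | succ k ih =>
    by_cases h : start = k + 1
    · subst h; simp
    · have hsk : start ≤ k := by omega
      have := hrun k hsk (by omega)
      have := ih hsk (fun j hj hjk => hrun j hj (by omega))
      push_cast
      omega

lemma run_idx_iff (nums : List Int) (start k : Nat) (hs : start ≤ k)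
    (hrun : ∀ j, start ≤ j → j < k → nums.getD j 0 + 1 = nums.getD (j + 1) 0) :
    (start = k ↔ nums.getD start 0 = nums.getD k 0) := by
  have := run_val nums start k hs hrun
  constructor
  · intro h; subst h; rfl
  · intro h; omega

-- B side -------------------------------------------------------------------

-- recursive reading of B's zip-of-adjacent-cuts loop
def gFmt (nums : List Int) (s : Int) : List Int → List String
  | [] => []
  | e :: rest => bFmtPair nums (s, e) :: gFmt nums e rest

lemma zip_eq_gFmt (nums : List Int) (cs : List Int) (c : Int) :
    (List.zip (c :: cs) cs).map (bFmtPair nums) = gFmt nums c cs := by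
  induction cs generalizing c with
  | nil => rfl
  | cons e rest ih =>
    rw [List.zip_cons_cons, List.map_cons, gFmt, ih e]

lemma B_loop (nums : List Int) (m : Nat) :
    ∀ (k start : Nat), nums.length - 1 - k = m → k < nums.length → start ≤ k →
    (∀ j, start ≤ j → j < k → nums.getD j 0 + 1 = nums.getD (j + 1) 0) →
    gFmt nums (start : Int)
      (((PySem.List.pyRange (k : Int) ((nums.length : Int) - 1) 1).filter (bTest nums)).map
        (· + 1) ++ [(nums.length : Int)])
      = crRec (nums.getD start 0) (nums.getD k 0) (nums.drop (k + 1)) := by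
  induction m with
  | zero =>
    intro k start hm hk hsk hrun
    have hkeq : k = nums.length - 1 := by omega
    have hempty : PySem.List.pyRange (k : Int) ((nums.length : Int) - 1) 1 = [] := by
      simp [PySem.List.pyRange]; omega
    rw [hempty]
    have hdrop : nums.drop (k + 1) = [] := by
      apply List.drop_eq_nil_of_le; omega
    rw [hdrop]
    simp only [List.filter_nil, List.map_nil, List.nil_append]
    unfold gFmt gFmt bFmtPair crRec fmt2
    dsimp only
    have hval := run_idx_iff nums start k hsk hrun
    have hcast : ((nums.length : Int) - (start : Int) = 1) ↔ start = k := by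
      constructor <;> intro h <;> omega
    by_cases hse : start = k
    · rw [if_pos (hcast.mpr hse), if_pos (hval.mp hse)]
      simp [PySem.List.pyGetD_natCast]
    · rw [if_neg (fun h => hse (hcast.mp h)), if_neg (fun h => hse (hval.mpr h))]
      have : ((nums.length : Int)) - 1 = ((k : Nat) : Int) := by omega
      rw [this]
      simp [PySem.List.pyGetD_natCast]
  | succ m ih =>
    intro k start hm hk hsk hrun
    have hklt : k < nums.length - 1 := by omega
    rw [PySem.List.pyRange_one_cons (by omega : (k : Int) < (nums.length : Int) - 1)]
    have hk1 : k + 1 < nums.length := by omega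
    have hdrop : nums.drop (k + 1) = nums.getD (k + 1) 0 :: nums.drop (k + 2) := by
      rw [List.drop_eq_getElem_cons hk1, List.getD_eq_getElem nums 0 hk1]
    have hcast1 : (k : Int) + 1 = ((k + 1 : Nat) : Int) := by push_cast; ring
    have hbt : bTest nums (k : Int) = true ↔ ¬ nums.getD k 0 + 1 = nums.getD (k + 1) 0 := by
      unfold bTest
      rw [hcast1]
      simp only [PySem.List.pyGetD_natCast, bne_iff_ne, ne_eq]
    by_cases hc : nums.getD k 0 + 1 = nums.getD (k + 1) 0
    · have hbf : bTest nums (k : Int) = false := by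
        cases hb : bTest nums (k : Int) with
        | false => rfl
        | true => exact absurd (hbt.mp hb) (not_not_intro hc)
      rw [List.filter_cons_of_neg (by simp [hbf])]
      rw [hcast1, ih (k + 1) start (by omega) hk1 (by omega)
        (fun j hj hjk => by
          by_cases hjc : j = k
          · subst hjc; exact hc
          · exact hrun j hj (by omega))]
      rw [hdrop]
      simp only [crRec]
      rw [if_neg (not_not_intro hc)]
    · rw [List.filter_cons_of_pos (by simpa using hbt.mpr hc)]
      simp only [List.map_cons, List.cons_append, gFmt]
      rw [hcast1, ih (k + 1) (k + 1) (by omega) hk1 le_rfl (fun j hj hjk => by omega)]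
      rw [hdrop]
      simp only [crRec]
      rw [if_pos hc]
      congr 1
      unfold bFmtPair fmt2
      dsimp only
      have hval := run_idx_iff nums start k hsk hrun
      have hcast2 : (((k + 1 : Nat) : Int) - (start : Int) = 1) ↔ start = k := by
        constructor <;> intro h <;> omega
      have he : ((k + 1 : Nat) : Int) - 1 = ((k : Nat) : Int) := by push_cast; ring
      by_cases hse : start = k
      · rw [if_pos (hcast2.mpr hse), if_pos (hval.mp hse), hse]
        simp [PySem.List.pyGetD_natCast]
      · rw [if_neg (fun h => hse (hcast2.mp h)), if_neg (fun h => hse (hval.mpr h)), he]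
        simp [PySem.List.pyGetD_natCast]

lemma alt_eq_cr (z : Int) (zs : List Int) :
    composeRanges_alt (z :: zs) = crRec z z zs := by
  unfold composeRanges_alt
  rw [if_neg (by simp)]
  dsimp only
  rw [List.cons_append, List.tail_cons, zip_eq_gFmt]
  have := B_loop (z :: zs) ((z :: zs).length - 1 - 0) 0 0 rfl (by simp) le_rfl
    (fun j hj hjk => by omega)
  rw [show ((0 : Nat) : Int) = (0 : Int) from rfl] at this
  rw [this]
  simp

-- A side -------------------------------------------------------------------

lemma A_loop (nums : List Int) (m : Nat) :
    ∀ (k start : Nat) (ans : List String), nums.length - 1 - k = m → k < nums.length →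
    start ≤ k →
    (∀ j, start ≤ j → j < k → nums.getD j 0 + 1 = nums.getD (j + 1) 0) →
    aFin nums ((PySem.List.pyRange (k : Int) ((nums.length : Int) - 1) 1).foldl
        (aStep nums) (ans, (start : Int)))
      = ans ++ crRec (nums.getD start 0) (nums.getD k 0) (nums.drop (k + 1)) := by
  induction m with
  | zero =>
    intro k start ans hm hk hsk hrun
    have hkeq : k = nums.length - 1 := by omega
    have hempty : PySem.List.pyRange (k : Int) ((nums.length : Int) - 1) 1 = [] := by
      simp [PySem.List.pyRange]; omega
    rw [hempty]
    simp only [List.foldl_nil]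
    have hdrop : nums.drop (k + 1) = [] := by
      apply List.drop_eq_nil_of_le; omega
    rw [hdrop]
    unfold aFin crRec fmt2
    have hcast : ((start : Int) = (nums.length : Int) - 1) ↔ start = k := by
      constructor <;> intro h <;> omega
    have hval := run_idx_iff nums start k hsk hrun
    by_cases hse : start = k
    · rw [if_pos (hcast.mpr hse), if_pos (hval.mp hse)]
      simp [PySem.List.pyGetD_natCast]
    · rw [if_neg (fun h => hse (hcast.mp h)), if_neg (fun h => hse (hval.mpr h))]
      have : ((nums.length : Int) - 1) = ((k : Nat) : Int) := by omega
      rw [this]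
      simp [PySem.List.pyGetD_natCast]
  | succ m ih =>
    intro k start ans hm hk hsk hrun
    have hklt : k < nums.length - 1 := by omega
    rw [PySem.List.pyRange_one_cons (by omega : (k : Int) < (nums.length : Int) - 1)]
    simp only [List.foldl_cons]
    have hk1 : k + 1 < nums.length := by omega
    have hdrop : nums.drop (k + 1) = nums.getD (k + 1) 0 :: nums.drop (k + 2) := by
      rw [List.drop_eq_getElem_cons hk1, List.getD_eq_getElem nums 0 hk1]
    have hcast1 : (k : Int) + 1 = ((k + 1 : Nat) : Int) := by push_cast; ring
    by_cases hc : nums.getD k 0 + 1 = nums.getD (k + 1) 0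
    · have hstep : aStep nums (ans, (start : Int)) (k : Int) = (ans, (start : Int)) := by
        unfold aStep
        rw [if_neg]
        rw [hcast1]
        simp only [PySem.List.pyGetD_natCast]
        exact not_not_intro hc
      rw [hstep, hcast1,
        ih (k + 1) start ans (by omega) hk1 (by omega)
          (fun j hj hjk => by
            by_cases hjc : j = k
            · subst hjc; exact hc
            · exact hrun j hj (by omega))]
      rw [hdrop]
      simp only [crRec]
      rw [if_neg (not_not_intro hc)]
    · have hstep : aStep nums (ans, (start : Int)) (k : Int) =
          (ans ++ [fmt2 (nums.getD start 0) (nums.getD k 0)], (k : Int) + 1) := by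
        unfold aStep
        rw [if_pos (by rw [hcast1]; simp only [PySem.List.pyGetD_natCast]; exact hc)]
        simp only [PySem.List.pyGetD_natCast, Prod.mk.injEq, List.append_cancel_left_eq,
          List.cons.injEq, and_true]
        unfold fmt2
        have hcast2 : ((start : Int) = (k : Int)) ↔ start = k := by
          constructor <;> intro h <;> omega
        have hval := run_idx_iff nums start k hsk hrun
        by_cases hse : start = k
        · rw [if_pos (hcast2.mpr hse), if_pos (hval.mp hse), hse]
        · rw [if_neg (fun h => hse (hcast2.mp h)), if_neg (fun h => hse (hval.mpr h))]
      rw [hstep, hcast1,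
        ih (k + 1) (k + 1) (ans ++ [fmt2 (nums.getD start 0) (nums.getD k 0)]) (by omega)
          hk1 le_rfl (fun j hj hjk => by omega)]
      rw [hdrop]
      simp only [crRec]
      rw [if_pos hc]
      simp

lemma a_eq_cr (z : Int) (zs : List Int) :
    composeRanges (z :: zs) = crRec z z zs := by
  unfold composeRanges
  by_cases h1 : (z :: zs).length ≤ 1
  · have : zs = [] := by
      cases zs with
      | nil => rfl
      | cons a t => simp at h1
    subst this
    simp [crRec, fmt2]
  · rw [if_neg (by exact_mod_cast h1)]
    have := A_loop (z :: zs) ((z :: zs).length - 1 - 0) 0 0 []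
      rfl (by omega) le_rfl (fun j hj hjk => by omega)
    rw [show ((0 : Nat) : Int) = (0 : Int) from rfl] at this
    rw [this]
    simp

-- ===== VERDICT (by name: the statement is the Claim_ definition above) =====
theorem composeRanges_spec : Claim_equal_composeRanges := by
  intro nums _
  unfold Spec_composeRanges
  cases nums with
  | nil => rfl
  | cons z zs => rw [a_eq_cr, alt_eq_cr]
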